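-- pv_equiv track=rewrite | github.com/Sumedha494/DSA-Questions | sum_of_zeroes.py | count_zeroes_binary_manual
-- ===== SOURCE A (Python) =====
-- def count_zeroes_binary_manual(n):
--     """Manual counting without string conversion"""
--     if n == 0:
--         return 1
--
--     n = abs(n)
--     count = 0
--
--     while n > 0:
--         if n & 1 == 0:  # Check last bit
--             count += 1
--         n >>= 1  # Right shift
--
--     return count
-- ===== SOURCE B (Python) =====
-- def count_zeroes_binary_manual(n):
--     """Closed form: total bit count minus number of set bits."""
--     if n == 0:
--         return 1
--     n = abs(n)
--     return n.bit_length() - bin(n).count("1")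
-- ===== Notes on version B (the rewrite author's own statement) =====
-- stated objective: idiomatic
-- what changed: Replaced the bit-by-bit while-loop that tests and shifts with the closed-form expression bit_length() minus popcount (via bin().count('1')).
import Mathlib
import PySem

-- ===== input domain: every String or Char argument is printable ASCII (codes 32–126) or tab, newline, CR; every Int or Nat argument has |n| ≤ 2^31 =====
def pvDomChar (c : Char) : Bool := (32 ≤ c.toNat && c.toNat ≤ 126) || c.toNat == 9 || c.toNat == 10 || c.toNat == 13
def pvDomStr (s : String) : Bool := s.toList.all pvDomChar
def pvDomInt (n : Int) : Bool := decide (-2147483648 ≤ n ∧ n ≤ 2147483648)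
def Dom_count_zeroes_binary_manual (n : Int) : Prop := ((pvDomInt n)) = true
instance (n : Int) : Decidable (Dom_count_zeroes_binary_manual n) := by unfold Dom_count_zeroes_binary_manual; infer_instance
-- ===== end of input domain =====

-- ===== PORT A =====
-- B replaces A's bit-by-bit while-loop with the closed form bit_length - popcount (return value only).

-- A's while-loop: while n > 0: if n & 1 == 0: count += 1; n >>= 1
def pvLoopA (m : Nat) (count : Int) : Int :=
  if m = 0 then count
  else pvLoopA (m / 2) (if m % 2 = 0 then count + 1 else count)
decreasing_by exact Nat.div_lt_self (Nat.pos_of_ne_zero (by assumption)) (by omega)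

def count_zeroes_binary_manual (n : Int) : Int :=
  if n = 0 then 1 else pvLoopA n.natAbs 0

-- ===== PORT B =====
-- port of Python's int.bit_length()
def pvBitLen (m : Nat) : Nat :=
  if m = 0 then 0 else pvBitLen (m / 2) + 1
decreasing_by exact Nat.div_lt_self (Nat.pos_of_ne_zero (by assumption)) (by omega)

-- port of bin(m).count("1") (the popcount of m)
def pvPopCount (m : Nat) : Nat :=
  if m = 0 then 0 else m % 2 + pvPopCount (m / 2)
decreasing_by exact Nat.div_lt_self (Nat.pos_of_ne_zero (by assumption)) (by omega)

def count_zeroes_binary_manual_alt (n : Int) : Int :=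
  if n = 0 then 1
  else ((pvBitLen n.natAbs : Int) - (pvPopCount n.natAbs : Int))

-- ===== PRECONDITION & SPEC =====
def Spec_count_zeroes_binary_manual (n : Int) (out : Int) : Prop := out = count_zeroes_binary_manual_alt n
instance (n : Int) (out : Int) : Decidable (Spec_count_zeroes_binary_manual n out) := by unfold Spec_count_zeroes_binary_manual; infer_instance

-- ===== CLAIM =====
def Claim_equal_count_zeroes_binary_manual : Prop := ∀ (n : Int), Dom_count_zeroes_binary_manual n → Spec_count_zeroes_binary_manual n (count_zeroes_binary_manual n)

-- ===== LEMMAS AND PROOFS =====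
lemma pvLoopA_eq (m : Nat) : ∀ count : Int,
    pvLoopA m count = count + (pvBitLen m : Int) - (pvPopCount m : Int) := by
  induction m using Nat.strong_induction_on with
  | _ m ih =>
    intro count
    rw [pvLoopA, pvBitLen, pvPopCount]
    by_cases h : m = 0
    · simp [h]
    · have hlt : m / 2 < m := Nat.div_lt_self (Nat.pos_of_ne_zero h) (by omega)
      simp only [h, if_false]
      rw [ih (m / 2) hlt]
      have h2 : m % 2 = 0 ∨ m % 2 = 1 := Nat.mod_two_eq_zero_or_one m
      rcases h2 with h2 | h2 <;> simp [h2] <;> ring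

-- ===== VERDICT =====
theorem count_zeroes_binary_manual_spec : Claim_equal_count_zeroes_binary_manual := by
  intro n _
  unfold Spec_count_zeroes_binary_manual count_zeroes_binary_manual count_zeroes_binary_manual_alt
  by_cases h : n = 0
  · simp [h]
  · simp only [h, if_false]
    rw [pvLoopA_eq]
    ring
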